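-- pv_equiv track=rewrite | github.com/FutureMaker0/Programmers-Lv.1 | 문자열 나누기.py | solution
-- ===== SOURCE A (Python) =====
-- def solution(s):
--     answer = 0
--     same = 0
--     diff = 0
--
--     for elem in s:
--
--         if same == diff:
--             answer += 1
--             head = elem
--
--         if elem == head:
--             same += 1
--         else:
--             diff += 1
--
--     return answer
-- ===== SOURCE B (Python) =====
-- def solution(s):
--     answer = 0
--     while s:
--         head = s[0]
--         same = 0
--         diff = 0
--         for i, c in enumerate(s):
--             if c == head:
--                 same += 1
--             else:
--                 diff += 1
--             if same == diff:
--                 answer += 1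
--                 s = s[i + 1:]
--                 break
--         else:
--             answer += 1
--             s = ''
--     return answer
-- ===== Notes on version B (the rewrite author's own statement) =====
-- stated objective: alternative
-- what changed: Replaced the single-pass state machine with running answer/same/diff counters by a segment-extraction loop that repeatedly scans and cuts off one balanced prefix segment (for-else handles a trailing unbalanced segment).
import Mathlib
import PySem

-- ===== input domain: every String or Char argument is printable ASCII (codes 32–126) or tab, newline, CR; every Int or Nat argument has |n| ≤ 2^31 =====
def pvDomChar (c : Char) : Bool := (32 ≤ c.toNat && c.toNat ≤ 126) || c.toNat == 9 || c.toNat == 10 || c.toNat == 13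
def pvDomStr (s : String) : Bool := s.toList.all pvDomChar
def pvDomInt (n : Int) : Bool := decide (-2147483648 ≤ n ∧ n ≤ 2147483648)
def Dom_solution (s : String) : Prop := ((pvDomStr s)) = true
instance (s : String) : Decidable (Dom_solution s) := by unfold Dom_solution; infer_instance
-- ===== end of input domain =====

-- B extracts one balanced segment per outer iteration instead of A's flat counter state machine; same values, alternative decomposition.

-- ===== PORT A =====
-- one loop step of A: the two ifs in order; Python's `head` is unassigned before the
-- first iteration but is always set (same == diff holds initially) before it is read,
-- so a dummy initial head is never compared.
def stepA (st : Int × Int × Int × Char) (c : Char) : Int × Int × Int × Char :=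
  let answer := st.1
  let same := st.2.1
  let diff := st.2.2.1
  let head := st.2.2.2
  let answer' := if same == diff then answer + 1 else answer
  let head' := if same == diff then c else head
  if c == head' then (answer', same + 1, diff, head')
  else (answer', same, diff + 1, head')

def solution (s : String) : Int :=
  (s.toList.foldl stepA (0, 0, 0, ' ')).1

-- ===== PORT B =====
-- inner for-loop of B: scan for the first position where same == diff after counting c;
-- returns the remaining suffix (s[i+1:]) or none if the segment never balances (for-else).
def scanSeg (head : Char) : List Char → Int → Int → Option (List Char)
  | [], _, _ => none
  | c :: rest, same, diff =>
    let same' := if c == head then same + 1 else same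
    let diff' := if c == head then diff else diff + 1
    if same' == diff' then some rest else scanSeg head rest same' diff'

-- used only for termination of solBList (the Python while-loop strictly shrinks s)
theorem scanSeg_length (head : Char) : ∀ (l : List Char) (same diff : Int) (rem : List Char),
    scanSeg head l same diff = some rem → rem.length < l.length := by
  intro l
  induction l with
  | nil => intro same diff rem h; simp [scanSeg] at h
  | cons c rest ih =>
    intro same diff rem h
    simp only [scanSeg] at h
    split_ifs at h with hb
    all_goals first
      | (cases h; simp)
      | exact Nat.lt_trans (ih _ _ _ h) (by simp)

-- the outer while-loop of B
def solBList : List Char → Int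
  | [] => 0
  | c :: rest =>
    match h : scanSeg c (c :: rest) 0 0 with
    | some rem => 1 + solBList rem
    | none => 1
termination_by l => l.length
decreasing_by exact scanSeg_length _ _ _ _ _ h

def solution_alt (s : String) : Int := solBList s.toList

-- ===== PRECONDITION & SPEC =====
def Spec_solution (s : String) (out : Int) : Prop := out = solution_alt s
instance (s : String) (out : Int) : Decidable (Spec_solution s out) := by unfold Spec_solution; infer_instance

-- ===== CLAIM (what is proved, stated in full; the proofs are below) =====
def Claim_equal_solution : Prop := ∀ (s : String), Dom_solution s → Spec_solution s (solution s)

-- ===== LEMMAS AND PROOFS =====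

theorem solBList_cons (c : Char) (rest : List Char) :
    solBList (c :: rest) =
      match scanSeg c (c :: rest) 0 0 with
      | some rem => 1 + solBList rem
      | none => 1 := by
  rw [solBList]
  split
  next rem heq => rw [heq]
  next heq => rw [heq]

-- scanSeg's balance test depends only on same - diff
theorem scanSeg_shift (head : Char) : ∀ (l : List Char) (same diff t : Int),
    scanSeg head l (same + t) (diff + t) = scanSeg head l same diff := by
  intro l
  induction l with
  | nil => intro same diff t; simp [scanSeg]
  | cons c rest ih =>
    intro same diff t
    by_cases hc : (c == head) = true
    · have e1 : scanSeg head (c :: rest) (same + t) (diff + t) =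
          if (same + t + 1 == diff + t) then some rest
          else scanSeg head rest (same + t + 1) (diff + t) := by
        simp [scanSeg, hc]
      have e2 : scanSeg head (c :: rest) same diff =
          if (same + 1 == diff) then some rest
          else scanSeg head rest (same + 1) diff := by
        simp [scanSeg, hc]
      have hcond : (same + t + 1 == diff + t) = (same + 1 == diff) := by
        by_cases h : same + 1 = diff
        · have h2 : same + t + 1 = diff + t := by omega
          simp [h2]
          omega
        · have h2 : same + t + 1 ≠ diff + t := by omega
          simp [h, h2]
      rw [e1, e2, hcond]
      split
      · rfl
      · rw [show same + t + 1 = same + 1 + t by ring]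
        exact ih (same + 1) diff t
    · have e1 : scanSeg head (c :: rest) (same + t) (diff + t) =
          if (same + t == diff + t + 1) then some rest
          else scanSeg head rest (same + t) (diff + t + 1) := by
        simp [scanSeg, hc]
      have e2 : scanSeg head (c :: rest) same diff =
          if (same == diff + 1) then some rest
          else scanSeg head rest same (diff + 1) := by
        simp [scanSeg, hc]
      have hcond : (same + t == diff + t + 1) = (same == diff + 1) := by
        by_cases h : same = diff + 1
        · have h2 : same + t = diff + t + 1 := by omega
          simp [h2]
          omega
        · have h2 : same + t ≠ diff + t + 1 := by omega
          simp [h, h2]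
      rw [e1, e2, hcond]
      split
      · rfl
      · rw [show diff + t + 1 = diff + 1 + t by ring]
        exact ih same (diff + 1) t

-- main invariant: from a balanced state A's fold counts exactly B's segments;
-- from an unbalanced mid-segment state it follows scanSeg
theorem foldA_main : ∀ (l : List Char),
    (∀ (a k : Int) (h : Char), (l.foldl stepA (a, k, k, h)).1 = a + solBList l) ∧
    (∀ (a same diff : Int) (h : Char), same ≠ diff →
      (l.foldl stepA (a, same, diff, h)).1 =
        match scanSeg h l same diff with
        | none => a
        | some rem => a + solBList rem) := by
  intro l
  induction l with
  | nil =>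
    constructor
    · intro a k h; simp [solBList]
    · intro a same diff h _; simp [scanSeg]
  | cons c rest ih =>
    constructor
    · intro a k h
      have hstep : stepA (a, k, k, h) c = (a + 1, k + 1, k, c) := by
        simp [stepA]
      rw [List.foldl_cons, hstep]
      rw [solBList_cons]
      have hs : scanSeg c (c :: rest) 0 0 = scanSeg c rest 1 0 := by
        simp [scanSeg]
      rw [hs]
      have hne : (k + 1 : Int) ≠ k := by omega
      have := ih.2 (a + 1) (k + 1) k c hne
      rw [this]
      have hsh : scanSeg c rest (k + 1) k = scanSeg c rest 1 0 := by
        have := scanSeg_shift c rest 1 0 k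
        rw [show (1 : Int) + k = k + 1 by ring, show (0 : Int) + k = k by ring] at this
        exact this
      rw [hsh]
      cases scanSeg c rest 1 0 with
      | none => ring
      | some rem => ring
    · intro a same diff h hne
      have hnb : (same == diff) = false := by simp [hne]
      by_cases hc : c = h
      · have hstep : stepA (a, same, diff, h) c = (a, same + 1, diff, h) := by
          simp [stepA, hnb, hc]
        rw [List.foldl_cons, hstep]
        have hscan : scanSeg h (c :: rest) same diff =
            if (same + 1 == diff) then some rest else scanSeg h rest (same + 1) diff := by
          simp [scanSeg, hc]
        rw [hscan]
        by_cases hb : same + 1 = diff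
        · simp only [hb, beq_self_eq_true, if_true]
          exact ih.1 a diff h
        · rw [if_neg (by simp [beq_iff_eq, hb])]
          exact ih.2 a (same + 1) diff h hb
      · have hstep : stepA (a, same, diff, h) c = (a, same, diff + 1, h) := by
          simp [stepA, hnb, hc]
        rw [List.foldl_cons, hstep]
        have hscan : scanSeg h (c :: rest) same diff =
            if (same == diff + 1) then some rest else scanSeg h rest same (diff + 1) := by
          simp [scanSeg, hc]
        rw [hscan]
        by_cases hb : same = diff + 1
        · simp only [hb, beq_self_eq_true, if_true]
          exact ih.1 a (diff + 1) h
        · rw [if_neg (by simp [beq_iff_eq, hb])]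
          exact ih.2 a same (diff + 1) h hb

-- ===== VERDICT (by name: the statement is the Claim_ definition above) =====
theorem solution_spec : Claim_equal_solution := by
  intro s _
  unfold Spec_solution solution solution_alt
  have := (foldA_main s.toList).1 0 0 ' '
  rw [this]; ring
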